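-- pv_equiv track=rewrite | github.com/mateuszwroobel/DSA | egzaminy/egz2/egz2B/egz2B_n^2.py | bitgame
-- ===== SOURCE A (Python) =====
-- def bitgame(T):
--     n = len(T)
--     deleted = [False] * n
--     remain = n
--
--     for i in range(n):
--         #zmienna do usuniecie indeksu "i"
--         delete_own = False
--
--         for j in range(i-1,-1,-1):
--             if T[j] <= T[i] and not deleted[j]:
--                 delete_own = True #Bede musial usunac tez indeks i
--                 deleted[j] = True #Usuwam mniejsze liczby
--                 remain -= 1
--
--             #Usuwanie indeksu i
--             if delete_own and not deleted[i]:
--                 remain-= 1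
--                 deleted[i] = True
--
--     return remain
-- ===== SOURCE B (Python) =====
-- def bitgame(T):
--     # Monotonic strictly-decreasing stack: one left-to-right pass.
--     stack = []
--     for x in T:
--         popped = False
--         while stack and stack[-1] <= x:
--             stack.pop()
--             popped = True
--         if not popped:
--             stack.append(x)
--     return len(stack)
-- ===== Notes on version B (the rewrite author's own statement) =====
-- stated objective: faster
-- what changed: Replaced the quadratic nested index scan with mutable deleted-flags by a single left-to-right pass over a strictly decreasing monotonic stack: survivors <= the current value are popped, and the current value is pushed only if nothing was popped.
import Mathlib
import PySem

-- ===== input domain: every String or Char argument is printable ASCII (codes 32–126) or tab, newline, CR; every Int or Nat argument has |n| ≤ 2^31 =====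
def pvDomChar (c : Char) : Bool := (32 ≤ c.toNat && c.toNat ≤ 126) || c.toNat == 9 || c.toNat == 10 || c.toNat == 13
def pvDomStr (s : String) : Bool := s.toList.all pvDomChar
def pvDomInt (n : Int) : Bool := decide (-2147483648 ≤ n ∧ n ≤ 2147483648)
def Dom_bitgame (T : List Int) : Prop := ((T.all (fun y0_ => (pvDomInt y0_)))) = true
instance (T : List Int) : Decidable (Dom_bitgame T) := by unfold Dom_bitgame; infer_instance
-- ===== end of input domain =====

-- B replaces A's quadratic nested scan over deleted-flags by a one-pass monotonic
-- (strictly decreasing) stack; objective: faster (asymptotic).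

-- ===== PORT A =====
def pvInner (T : List Int) (i : Int) (st2 : Bool × List Bool × Int) (j : Int) : Bool × List Bool × Int :=
  let st3 :=
    if PySem.List.pyGetD T j 0 ≤ PySem.List.pyGetD T i 0 ∧ PySem.List.pyGetD st2.2.1 j false = false then
      (true, PySem.List.pySetD st2.2.1 j true, st2.2.2 - 1)
    else st2
  if st3.1 = true ∧ PySem.List.pyGetD st3.2.1 i false = false then
    (st3.1, PySem.List.pySetD st3.2.1 i true, st3.2.2 - 1)
  else st3

def pvOuter (T : List Int) (st : List Bool × Int) (i : Int) : List Bool × Int :=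
  let r := (PySem.List.pyRange (i-1) (-1) (-1)).foldl (pvInner T i) (false, st.1, st.2)
  (r.2.1, r.2.2)

def bitgame (T : List Int) : Int :=
  ((PySem.List.pyRange 0 (T.length) 1).foldl (pvOuter T)
    (List.replicate T.length false, (T.length : Int))).2

-- ===== PORT B =====
-- the while-loop: pop stack elements ≤ x off the top; second component = "popped"
def pvPop (x : Int) : List Int → List Int × Bool
  | [] => ([], false)
  | t :: rest => if t ≤ x then ((pvPop x rest).1, true) else (t :: rest, false)

def pvStep (stack : List Int) (x : Int) : List Int :=
  let r := pvPop x stack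
  if r.2 then r.1 else x :: r.1

def bitgame_alt (T : List Int) : Int := ((T.foldl pvStep []).length : Int)

-- ===== PRECONDITION & SPEC =====
def Spec_bitgame (T : List Int) (out : Int) : Prop := out = bitgame_alt T
instance (T : List Int) (out : Int) : Decidable (Spec_bitgame T out) := by unfold Spec_bitgame; infer_instance

-- ===== CLAIM (what is proved, stated in full; the proofs are below) =====
def Claim_equal_bitgame : Prop := ∀ (T : List Int), Dom_bitgame T → Spec_bitgame T (bitgame T)

-- ===== LEMMAS AND PROOFS =====

-- value of T at a nonnegative index
def valT (T : List Int) (k : Nat) : Int := T.getD k 0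

-- index-level mirror of pvPop/pvStep: the stack holds surviving indices
def popI (T : List Int) (x : Int) : List Nat → List Nat × Bool
  | [] => ([], false)
  | t :: rest => if valT T t ≤ x then ((popI T x rest).1, true) else (t :: rest, false)

def stepI (T : List Int) (s : List Nat) (i : Nat) : List Nat :=
  let r := popI T (valT T i) s
  if r.2 then r.1 else i :: r.1

-- the index stack after the first i elements
def IS (T : List Int) (i : Nat) : List Nat := (List.range i).foldl (stepI T) []

-- A's deleted mask, as a pointwise function of the index
def maskQ (n : Nat) (Q : Nat → Bool) : List Bool := (List.range n).map Q

def Qof (T : List Int) (i k : Nat) : Bool := decide (k < i) && !(decide (k ∈ IS T i))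

-- order along the index stack: indices strictly decrease, values strictly increase
def pvR (T : List Int) (a b : Nat) : Prop := b < a ∧ valT T a < valT T b

theorem pyGetD_nonneg {α : Type} (xs : List α) (j : Int) (d : α) (h0 : 0 ≤ j) :
    PySem.List.pyGetD xs j d = xs.getD j.toNat d := by
  obtain ⟨m, rfl⟩ : ∃ m : Nat, j = ↑m := ⟨j.toNat, (Int.toNat_of_nonneg h0).symm⟩
  simp

theorem maskQ_get (n : Nat) (Q : Nat → Bool) (j : Int) (h0 : 0 ≤ j) (h1 : j.toNat < n) :
    PySem.List.pyGetD (maskQ n Q) j false = Q j.toNat := by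
  rw [pyGetD_nonneg _ _ _ h0, List.getD_eq_getElem _ _ (by simp [maskQ]; omega)]
  simp [maskQ]

theorem maskQ_set (n : Nat) (Q : Nat → Bool) (j : Int) (h0 : 0 ≤ j) (h1 : j.toNat < n) :
    PySem.List.pySetD (maskQ n Q) j true = maskQ n (fun k => if k = j.toNat then true else Q k) := by
  rw [PySem.List.pySetD_of_nonneg _ _ h0]
  apply List.ext_getElem
  · simp [maskQ]
  · intro k hk hk2
    simp only [maskQ] at hk2 ⊢
    rw [List.getElem_set]
    by_cases h : j.toNat = k
    · simp [maskQ, h]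
    · have h' : k ≠ j.toNat := fun hh => h hh.symm
      simp [maskQ, h']
      exact fun hh => absurd hh h

theorem maskQ_idx (n : Nat) (Q : Nat → Bool) (k : Nat) (h : k < n) :
    (maskQ n Q)[k]?.getD false = Q k := by
  simp [maskQ, List.getElem?_map, List.getElem?_range, h]

theorem maskQ_set' (n : Nat) (Q : Nat → Bool) (m : Nat) (h : m < n) :
    (maskQ n Q).set m true = maskQ n (fun k => decide (k = m) || Q k) := by
  apply List.ext_getElem
  · simp [maskQ]
  · intro k hk hk2
    simp only [maskQ] at hk2 ⊢
    rw [List.getElem_set]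
    by_cases hkm : m = k
    · simp [maskQ, hkm]
    · have h' : k ≠ m := fun hh => hkm hh.symm
      simp [maskQ, h']
      exact fun hh => absurd hh hkm

theorem maskQ_congr (n : Nat) (Q1 Q2 : Nat → Bool) (h : ∀ k, k < n → Q1 k = Q2 k) :
    maskQ n Q1 = maskQ n Q2 :=
  List.map_congr_left (fun k hk => h k (List.mem_range.mp hk))

def innerK (T : List Int) (i : Nat) (Q : Nat → Bool) (js : List Int) : List Int :=
  js.filter (fun j => Q j.toNat = false ∧ valT T j.toNat ≤ valT T i)

def innerRes (T : List Int) (i : Nat) (Q : Nat → Bool) (own : Bool) (r : Int) (js : List Int) : Bool × List Bool × Int :=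
  (own || !(innerK T i Q js).isEmpty,
   maskQ T.length (fun k => Q k || decide (k ∈ (innerK T i Q js).map Int.toNat)
     || (decide (k = i) && (own || !(innerK T i Q js).isEmpty))),
   r - (innerK T i Q js).length - (if own = false ∧ innerK T i Q js ≠ [] then 1 else 0))

theorem innerGen (T : List Int) (i : Nat) (hi : i < T.length) :
    ∀ (js : List Int) (Q : Nat → Bool) (own : Bool) (r : Int),
      js.Nodup →
      (∀ j ∈ js, 0 ≤ j ∧ j.toNat < i) →
      Q i = own →
      js.foldl (pvInner T (i : Int)) (own, maskQ T.length Q, r) = innerRes T i Q own r js := by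
  intro js
  induction js with
  | nil =>
    intro Q own r _ _ hQi
    simp only [List.foldl_nil, innerRes, innerK, List.filter_nil, List.isEmpty_nil, Bool.not_true,
      Bool.or_false, List.length_nil, List.map_nil, List.not_mem_nil, decide_false]
    refine Prod.ext rfl (Prod.ext ?_ ?_)
    · apply maskQ_congr
      intro k hk
      by_cases h : k = i <;> simp [h, hQi]
    · simp
  | cons j rest ih =>
    intro Q own r hnd hmem hQi
    obtain ⟨hj0, hji⟩ := hmem j (List.mem_cons_self)
    have hjn : j.toNat < T.length := lt_trans hji hi
    have hjne_i : j.toNat ≠ i := Nat.ne_of_lt hji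
    have hjrest : j ∉ rest := (List.nodup_cons.mp hnd).1
    have hndr : rest.Nodup := (List.nodup_cons.mp hnd).2
    have hmemr : ∀ j' ∈ rest, 0 ≤ j' ∧ j'.toNat < i := fun j' h => hmem j' (List.mem_cons_of_mem _ h)
    -- evaluate the reads in pvInner
    have hTj : PySem.List.pyGetD T j 0 = valT T j.toNat := pyGetD_nonneg T j 0 hj0
    have hTi : PySem.List.pyGetD T (i : Int) 0 = valT T i := by
      rw [pyGetD_nonneg T _ 0 (by positivity)]; simp [valT]
    rw [List.foldl_cons]
    by_cases hc : Q j.toNat = false ∧ valT T j.toNat ≤ valT T i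
    · -- j gets deleted
      have hc' : valT T j.toNat ≤ valT T i ∧ Q j.toNat = false := ⟨hc.2, hc.1⟩
      have hQ1i : (fun k => if k = j.toNat then true else Q k) i = own := by
        simp [hjne_i.symm, hQi]
      have hgi1 := maskQ_get T.length (fun k => if k = j.toNat then true else Q k) (i : Int)
        (by positivity) (by simpa using hi)
      have hsi1 := maskQ_set T.length (fun k => if k = j.toNat then true else Q k) (i : Int)
        (by positivity) (by simpa using hi)
      have hKcons : innerK T i Q (j :: rest) = j :: innerK T i Q rest := by
        simp only [innerK, List.filter_cons]
        rw [if_pos (by simpa using hc)]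
      have hKr : ∀ Q' : Nat → Bool, (∀ k, k ≠ j.toNat → k ≠ i → Q' k = Q k) →
          innerK T i Q' rest = innerK T i Q rest := by
        intro Q' hQ'
        apply List.filter_congr
        intro j' hj'
        obtain ⟨hj'0, hj'i⟩ := hmemr j' hj'
        have h1 : j'.toNat ≠ j.toNat := by
          intro hh
          have : j' = j := by omega
          exact hjrest (this ▸ hj')
        rw [hQ' j'.toNat h1 (Nat.ne_of_lt hj'i)]
      cases own with
      | true =>
        have hstep : pvInner T (i : Int) (true, maskQ T.length Q, r) j =
            (true, maskQ T.length (fun k => if k = j.toNat then true else Q k), r - 1) := by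
          simp only [pvInner, hTj, hTi, maskQ_get T.length Q j hj0 hjn]
          rw [if_pos hc', maskQ_set T.length Q j hj0 hjn]
          simp [hgi1, hQ1i, maskQ_idx, hi, hjne_i, hQi]
        rw [hstep, ih _ true (r - 1) hndr hmemr hQ1i]
        have hK := hKr (fun k => if k = j.toNat then true else Q k) (fun k hk1 _ => by simp [hk1])
        simp only [innerRes, hK, hKcons]
        refine Prod.ext (by simp) (Prod.ext ?_ ?_)
        · apply maskQ_congr
          intro k hk
          by_cases h1 : k = j.toNat <;> by_cases h2 : k = i <;> simp [h1, h2]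
        · simp only [List.length_cons]
          push_cast
          split_ifs <;> first | omega | (exfalso; simp_all)
      | false =>
        have hstep : pvInner T (i : Int) (false, maskQ T.length Q, r) j =
            (true, maskQ T.length (fun k => if k = i then true else
              (if k = j.toNat then true else Q k)), r - 2) := by
          simp only [pvInner, hTj, hTi, maskQ_get T.length Q j hj0 hjn]
          rw [if_pos hc', maskQ_set T.length Q j hj0 hjn]
          simp [hgi1, hQ1i, hsi1, maskQ_idx, hi, hjne_i, hQi]
          rw [if_neg (Ne.symm hjne_i), maskQ_set' T.length _ i hi]
          refine Prod.ext rfl (Prod.ext ?_ (by show r - 1 - 1 = r - 2; omega))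
          · apply maskQ_congr; intro k hk
            by_cases h1 : k = i <;> by_cases h2 : k = j.toNat <;> simp [h1, h2]
        have hQ2i : (fun k => if k = i then true else (if k = j.toNat then true else Q k)) i = true := by
          simp
        rw [hstep, ih _ true (r - 2) hndr hmemr hQ2i]
        have hK := hKr (fun k => if k = i then true else (if k = j.toNat then true else Q k))
          (fun k hk1 hk2 => by simp [hk1, hk2])
        simp only [innerRes, hK, hKcons]
        refine Prod.ext (by simp) (Prod.ext ?_ ?_)
        · apply maskQ_congr
          intro k hk
          by_cases h1 : k = j.toNat <;> by_cases h2 : k = i <;> simp [h1, h2]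
        · simp only [List.length_cons]
          push_cast
          split_ifs <;> first | omega | (exfalso; simp_all)
    · -- no deletion at j: pvInner is the identity here
      have hstep : pvInner T (i : Int) (own, maskQ T.length Q, r) j = (own, maskQ T.length Q, r) := by
        simp only [pvInner, hTj, hTi, maskQ_get T.length Q j hj0 hjn]
        rw [if_neg (show ¬(valT T j.toNat ≤ valT T i ∧ Q j.toNat = false) from fun h => hc ⟨h.2, h.1⟩)]
        cases own <;>
          simp [maskQ_get T.length Q (i : Int) (by positivity) (by simpa using hi), hQi,
            maskQ_idx, hi]
      rw [hstep, ih Q own r hndr hmemr hQi]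
      have hK : innerK T i Q (j :: rest) = innerK T i Q rest := by
        simp only [innerK, List.filter_cons]
        rw [if_neg (by simpa using hc)]
      simp only [innerRes, hK]

theorem popI_fst (T : List Int) (x : Int) (s : List Nat) :
    (popI T x s).1 = s.dropWhile (fun t => decide (valT T t ≤ x)) := by
  induction s with
  | nil => rfl
  | cons t rest ih =>
    by_cases h : valT T t ≤ x <;> simp [popI, List.dropWhile_cons, h, ih]

theorem popI_snd (T : List Int) (x : Int) (s : List Nat) :
    (popI T x s).2 = !(s.takeWhile (fun t => decide (valT T t ≤ x))).isEmpty := by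
  cases s with
  | nil => rfl
  | cons t rest =>
    by_cases h : valT T t ≤ x <;> simp [popI, List.takeWhile_cons, h]

theorem IS_succ (T : List Int) (i : Nat) : IS T (i+1) = stepI T (IS T i) i := by
  simp [IS, List.range_succ]

theorem IS_invariant (T : List Int) (i : Nat) :
    (IS T i).Pairwise (pvR T) ∧ (∀ k ∈ IS T i, k < i) := by
  induction i with
  | zero => simp [IS]
  | succ i ih =>
    obtain ⟨hp, hb⟩ := ih
    rw [IS_succ]
    simp only [stepI, popI_snd, popI_fst]
    set W := (IS T i).takeWhile (fun t => decide (valT T t ≤ valT T i)) with hW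
    by_cases hE : W.isEmpty
    · -- nothing popped: push i
      simp only [hE, Bool.not_true, Bool.false_eq_true, if_neg, not_false_iff]
      have hdw : (IS T i).dropWhile (fun t => decide (valT T t ≤ valT T i)) = IS T i := by
        cases hIS : IS T i with
        | nil => rfl
        | cons h t =>
          rw [List.dropWhile_cons]
          have : ¬ (valT T h ≤ valT T i) := by
            have : W = [] := List.isEmpty_iff.mp hE
            rw [hW, hIS, List.takeWhile_cons] at this
            by_cases hh : valT T h ≤ valT T i
            · simp [hh] at this
            · exact hh
          simp [this]
      rw [hdw]
      constructor
      · rw [List.pairwise_cons]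
        refine ⟨?_, hp⟩
        intro b hbmem
        refine ⟨hb b hbmem, ?_⟩
        -- valT T i < valT T b for every survivor b
        cases hIS : IS T i with
        | nil => rw [hIS] at hbmem; exact absurd hbmem (List.not_mem_nil)
        | cons h t =>
          have hh : ¬ (valT T h ≤ valT T i) := by
            have : W = [] := List.isEmpty_iff.mp hE
            rw [hW, hIS, List.takeWhile_cons] at this
            by_cases hx : valT T h ≤ valT T i
            · simp [hx] at this
            · exact hx
          rw [hIS] at hbmem
          rcases List.mem_cons.mp hbmem with rfl | hbt
          · omega
          · have := hp
            rw [hIS, List.pairwise_cons] at this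
            have := (this.1 b hbt).2
            omega
      · intro k hk
        rcases List.mem_cons.mp hk with rfl | hkt
        · omega
        · exact Nat.lt_succ_of_lt (hb k hkt)
    · rw [Bool.not_eq_true] at hE
      simp only [hE, Bool.not_false, if_pos]
      constructor
      · exact hp.sublist (List.dropWhile_sublist _)
      · intro k hk
        exact Nat.lt_succ_of_lt (hb k ((List.dropWhile_sublist _).mem hk))

theorem pvPop_map (T : List Int) (x : Int) (s : List Nat) :
    pvPop x (s.map (valT T)) = ((popI T x s).1.map (valT T), (popI T x s).2) := by
  induction s with
  | nil => rfl
  | cons t rest ih =>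
    simp only [List.map_cons, pvPop, popI]
    by_cases h : valT T t ≤ x
    · simp [h, ih]
    · simp [h]

theorem valstack_take (T : List Int) (i : Nat) (hi : i ≤ T.length) :
    (T.take i).foldl pvStep [] = (IS T i).map (valT T) := by
  induction i with
  | zero => simp [IS]
  | succ i ih =>
    have hi' : i < T.length := by omega
    rw [List.take_succ, List.foldl_append, ih (by omega), IS_succ]
    have : T[i]?.toList = [T[i]] := by simp [List.getElem?_eq_getElem hi']
    rw [this, List.foldl_cons, List.foldl_nil]
    have hTv : T[i] = valT T i := by
      simp [valT, List.getD_eq_getElem?_getD, List.getElem?_eq_getElem hi']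
    rw [hTv]
    unfold pvStep stepI
    rw [pvPop_map]
    by_cases h : (popI T (valT T i) (IS T i)).2 <;> simp [h]

theorem filter_revRange_mem (n : Nat) :
    ∀ (S : List Nat), S.Pairwise (fun a b => b < a) → (∀ x ∈ S, x < n) →
      (List.range n).reverse.filter (fun k => decide (k ∈ S)) = S := by
  induction n with
  | zero =>
    intro S _ hb
    cases S with
    | nil => rfl
    | cons a S' => exact absurd (hb a List.mem_cons_self) (by omega)
  | succ n ih =>
    intro S hp hb
    have hrev : (List.range (n+1)).reverse = n :: (List.range n).reverse := by
      rw [List.range_succ, List.reverse_append]; rfl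
    rw [hrev, List.filter_cons]
    by_cases hn : n ∈ S
    · -- S must start with n
      obtain ⟨a, S', rfl⟩ : ∃ a S', S = a :: S' := by
        cases S with
        | nil => exact absurd hn (List.not_mem_nil)
        | cons a S' => exact ⟨a, S', rfl⟩
      have ha : a = n := by
        rcases List.mem_cons.mp hn with h | h
        · omega
        · have := (List.pairwise_cons.mp hp).1 n h
          have := hb a List.mem_cons_self
          omega
      simp only [hn, decide_true, if_pos]
      rw [show a = n from ha] at hp hb hn ⊢
      have hcong : (List.range n).reverse.filter (fun k => decide (k ∈ n :: S')) =
          (List.range n).reverse.filter (fun k => decide (k ∈ S')) := by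
        apply List.filter_congr
        intro k hk
        have hklt : k < n := List.mem_range.mp (List.mem_reverse.mp hk)
        simp [List.mem_cons, Nat.ne_of_lt hklt]
      rw [hcong, ih S' (List.pairwise_cons.mp hp).2
        (fun x hx => (List.pairwise_cons.mp hp).1 x hx)]
    · simp only [hn, decide_false, Bool.false_eq_true, if_neg, not_false_iff]
      exact ih S hp (fun x hx => by
        have := hb x hx
        have : x ≠ n := fun hh => hn (hh ▸ hx)
        omega)


-- on a list whose order makes the predicate downward-closed, filter = takeWhile
theorem filter_eq_takeWhile {α : Type} (P : α → Bool) :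
    ∀ (l : List α), l.Pairwise (fun a b => P b = true → P a = true) →
      l.filter P = l.takeWhile P := by
  intro l hl
  induction l with
  | nil => rfl
  | cons t rest ih =>
    rcases List.pairwise_cons.mp hl with ⟨hhd, htl⟩
    by_cases h : P t = true
    · simp [List.takeWhile_cons, h, ih htl]
    · have : rest.filter P = [] := by
        apply List.filter_eq_nil_iff.mpr
        intro b hb hPb
        exact h (hhd b hb hPb)
      simp [List.takeWhile_cons, h, this]

theorem outer_invariant (T : List Int) : ∀ (i : Nat), i ≤ T.length →
    (PySem.List.pyRange 0 (i : Int) 1).foldl (pvOuter T)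
        (List.replicate T.length false, (T.length : Int)) =
      (maskQ T.length (Qof T i), (T.length : Int) - i + (IS T i).length) := by
  intro i
  induction i with
  | zero =>
    intro _
    rw [show ((0:Nat):Int) = 0 from rfl, PySem.List.pyRange_one_eq_nil (by omega), List.foldl_nil]
    refine Prod.ext ?_ ?_
    · show List.replicate T.length false = maskQ T.length (Qof T 0)
      rw [show Qof T 0 = fun _ => false from funext (fun k => by simp [Qof])]
      simp [maskQ]
    · show (T.length : Int) = (T.length : Int) - 0 + (IS T 0).length
      simp [IS]
  | succ i ih =>
    intro h1
    have hi : i < T.length := by omega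
    have hsplit : PySem.List.pyRange 0 ((i+1 : Nat) : Int) 1 =
        PySem.List.pyRange 0 (i : Int) 1 ++ [(i : Int)] := by
      push_cast
      exact PySem.List.pyRange_one_succ_right (by positivity)
    rw [hsplit, List.foldl_append, ih (by omega), List.foldl_cons, List.foldl_nil]
    -- set up the inner-loop application
    have hnd : (PySem.List.pyRange ((i:Int)-1) (-1) (-1)).Nodup := by
      rw [PySem.List.pyRange_neg_one_eq_reverse]
      exact List.nodup_reverse.mpr (PySem.List.nodup_pyRange_one _ _)
    have hmem : ∀ j ∈ PySem.List.pyRange ((i:Int)-1) (-1) (-1), 0 ≤ j ∧ j.toNat < i := by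
      intro j hj
      have := (PySem.List.mem_pyRange_neg_one).mp hj
      omega
    have hQii : Qof T i i = false := by simp [Qof]
    obtain ⟨hp, hb⟩ := IS_invariant T i
    have hnd2 : (IS T i).Nodup := hp.imp (fun h => by have := h.1; omega)
    -- characterise K
    set P : Nat → Bool := fun t => decide (valT T t ≤ valT T i) with hP
    set W := (IS T i).takeWhile P with hWdef
    have hrev : PySem.List.pyRange ((i:Int)-1) (-1) (-1) = (PySem.List.pyRange 0 (i:Int) 1).reverse := by
      rw [PySem.List.pyRange_neg_one_eq_reverse]
      norm_num
    have hKeq : innerK T i (Qof T i) (PySem.List.pyRange ((i:Int)-1) (-1) (-1)) =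
        W.map (fun (k : Nat) => (k : Int)) := by
      rw [innerK, hrev, PySem.List.pyRange_zero_nat, ← List.map_reverse, List.filter_map]
      refine congrArg (List.map _) ?_
      have h1 := List.filter_congr (l := (List.range i).reverse)
        (q := fun k => decide (k ∈ IS T i) && P k)
        (p := (fun j => decide (Qof T i j.toNat = false ∧ valT T j.toNat ≤ valT T i)) ∘
          (fun (k : Nat) => (k : Int)))
        (fun k hk => by
          have hki : k < i := List.mem_range.mp (List.mem_reverse.mp hk)
          by_cases hm : k ∈ IS T i <;> simp [Function.comp, Qof, hki, hm, hP])
      rw [h1]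
      have hff : (List.range i).reverse.filter (fun k => decide (k ∈ IS T i) && P k) =
          ((List.range i).reverse.filter (fun k => decide (k ∈ IS T i))).filter P := by
        rw [List.filter_filter]
        exact List.filter_congr (fun k _ => Bool.and_comm _ _)
      rw [hff, filter_revRange_mem i (IS T i) (hp.imp (fun h => h.1)) hb,
        filter_eq_takeWhile P (IS T i) (hp.imp (fun h hle => by
          have h2 := h.2
          rw [hP] at hle ⊢
          simp only [decide_eq_true_eq] at hle ⊢
          omega))]
    set K := innerK T i (Qof T i) (PySem.List.pyRange ((i:Int)-1) (-1) (-1)) with hK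
    have hKmap : K.map Int.toNat = W := by
      rw [hKeq, List.map_map]
      have hid : (Int.toNat ∘ fun (k : Nat) => (k : Int)) = id := funext (fun k => by simp)
      rw [hid, List.map_id]
    have hKlen : K.length = W.length := by rw [hKeq, List.length_map]
    have hKemp : K.isEmpty = W.isEmpty := by
      rw [hKeq]; cases W <;> simp
    have hKne : (K ≠ []) ↔ (W ≠ []) := by
      rw [hKeq]; cases W <;> simp
    -- IS at i+1
    have hIS1 : IS T (i+1) = if W.isEmpty then i :: IS T i else (IS T i).dropWhile P := by
      rw [IS_succ]
      simp only [stepI, popI_snd, popI_fst, ← hP, ← hWdef]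
      cases hE : W.isEmpty with
      | true =>
        have hW0 : W = [] := List.isEmpty_iff.mp hE
        have : (IS T i).dropWhile P = IS T i := by
          cases hISc : IS T i with
          | nil => rfl
          | cons h t =>
            rw [List.dropWhile_cons]
            have : P h = false := by
              rw [hWdef, hISc, List.takeWhile_cons] at hW0
              cases hPh : P h
              · rfl
              · simp [hPh] at hW0
            simp [this]
        simp [this]
      | false => simp
    have htwd := List.takeWhile_append_dropWhile (p := P) (l := IS T i)
    have hdisj : ∀ k, k ∈ W → k ∉ (IS T i).dropWhile P := by
      intro k hkW hkD
      rw [← htwd] at hnd2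
      exact (List.disjoint_of_nodup_append hnd2) hkW hkD
    have hlen : W.length + ((IS T i).dropWhile P).length = (IS T i).length := by
      conv_rhs => rw [← htwd]
      rw [List.length_append]
    -- now compute the step
    show pvOuter T (maskQ T.length (Qof T i), (T.length:Int) - i + (IS T i).length) i = _
    simp only [pvOuter]
    rw [innerGen T i hi _ (Qof T i) false _ hnd hmem hQii]
    simp only [innerRes, ← hK]
    refine Prod.ext ?_ ?_
    · show maskQ T.length _ = maskQ T.length (Qof T (i+1))
      apply maskQ_congr
      intro k hk
      rw [hKmap, hKemp]
      by_cases hki : k = i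
      · have hiW : i ∉ W := fun h => by
          have := hb i ((List.takeWhile_sublist _).mem (hWdef ▸ h))
          omega
        cases hE : W.isEmpty with
        | true =>
          have hiIS : i ∈ IS T (i+1) := by
            rw [hIS1, if_pos hE]
            exact List.mem_cons_self
          simp [hki, Qof, hQii, hiW, hiIS, hE, Nat.lt_succ_self]
        | false =>
          have hiIS : i ∉ IS T (i+1) := by
            rw [hIS1, if_neg (by simp [hE])]
            intro hc
            have := hb i ((List.dropWhile_sublist _).mem hc)
            omega
          simp [hki, Qof, hQii, hiW, hiIS, hE, Nat.lt_succ_self]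
      · by_cases hklt : k < i
        · -- below i: survives iff it survived and was not popped
          have hmem2 : k ∈ IS T (i+1) ↔ (k ∈ IS T i ∧ k ∉ W) := by
            rw [hIS1]
            cases hE : W.isEmpty with
            | true =>
              have hW0 : W = [] := List.isEmpty_iff.mp hE
              simp [hki, hW0]
            | false =>
              rw [if_neg (by simp [hE])]
              constructor
              · intro hD
                refine ⟨?_, fun hW => hdisj k hW hD⟩
                rw [← htwd]
                exact List.mem_append_right _ hD
              · rintro ⟨hIS2, hW2⟩
                rcases List.mem_append.mp (by rw [htwd]; exact hIS2) with h | h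
                · exact absurd h hW2
                · exact h
          by_cases hmem3 : k ∈ IS T i <;> by_cases hmem4 : k ∈ W <;>
            simp_all [Qof, Nat.lt_succ_of_lt hklt]
        · -- above i: untouched
          have h5 : k ∉ W := fun h => hklt (hb k ((List.takeWhile_sublist _).mem (hWdef ▸ h)))
          have h6 : k ∉ IS T (i+1) := by
            intro hc
            have := (IS_invariant T (i+1)).2 k hc
            omega
          have h7 : ¬ (k < i + 1) := by omega
          simp [Qof, hklt, hki, h5, h6, h7]
    · show _ = (T.length:Int) - (↑i+1) + ((IS T (i+1)).length : Int)
      have hL1 : ((IS T (i+1)).length : Int) =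
          if W.isEmpty then ((IS T i).length : Int) + 1 else ((IS T i).length : Int) - W.length := by
        rw [hIS1]
        cases W.isEmpty <;> simp <;> omega
      rw [hKlen]
      cases hE : W.isEmpty with
      | true =>
        have hW0 : W = [] := List.isEmpty_iff.mp hE
        rw [if_neg (by simp [hKne, hW0])]
        simp [hL1, hE, hW0]
        omega
      | false =>
        have hWne : W ≠ [] := fun h => by rw [h] at hE; simp at hE
        rw [if_pos (show True ∧ K ≠ [] from ⟨trivial, hKne.mpr hWne⟩)]
        rw [hL1]
        simp only [hE, if_neg Bool.false_ne_true]
        push_cast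
        omega

theorem valstack_eq (T : List Int) :
    T.foldl pvStep [] = (IS T T.length).map (valT T) := by
  have := valstack_take T T.length (le_refl _)
  rwa [List.take_length] at this

-- ===== VERDICT (by name: the statement is the Claim_ definition above) =====
theorem bitgame_spec : Claim_equal_bitgame := by
  intro T _
  unfold Spec_bitgame bitgame bitgame_alt
  rw [outer_invariant T T.length (le_refl _), valstack_eq]
  simp
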